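-- pv_equiv track=rewrite | github.com/firdavsxon/my_leetcode_solutions-Python | medium/Minimum Difference Element.py | find_max_in_biotonic_array
-- ===== SOURCE A (Python) =====
-- def find_max_in_biotonic_array(arr):
-- 	start , end = 0, len(arr)-1
--
-- 	# mid = start + (end-start)//2
-- 	# if arr[start] > arr[mid] and arr[start] > arr[end]:
-- 	# 	return arr[start]
-- 	# elif arr[end]> arr[mid] and arr[end] > arr[start]:
-- 	# 	return arr[end]
-- 	# largest = arr[mid]
-- 	# left = mid-1
-- 	# right = mid +1
-- 	# while largest < arr[left]:
-- 	# 	left -=1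
-- 	# while largest < arr[right]:
-- 	# 	right +=1
-- 	#
-- 	# return max(arr[left+1], arr[right-1])
-- 	while start < end:
-- 		mid = start + (end - start)//2
-- 		if arr[mid] > arr[mid+1]:
-- 			end = mid
-- 		else:
-- 			start = mid +1
-- 	return arr[start]
-- ===== SOURCE B (Python) =====
-- def find_max_in_biotonic_array(arr):
-- 	# Divide and conquer on slices: recurse into the half of the list that
-- 	# contains the peak, carrying the sublist itself instead of index bounds.
-- 	def rec(sub):
-- 		if len(sub) <= 1:
-- 			return sub[0]
-- 		mid = (len(sub) - 1) // 2
-- 		if sub[mid] > sub[mid + 1]: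
-- 			return rec(sub[:mid + 1])
-- 		return rec(sub[mid + 1:])
-- 	return rec(arr)
-- ===== Notes on version B (the rewrite author's own statement) =====
-- stated objective: alternative
-- what changed: Replaced the index-bound binary-search while loop with a recursive divide-and-conquer on list slices: the recursion carries the candidate sublist itself and halves it, with no start/end indices maintained.
import Mathlib
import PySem

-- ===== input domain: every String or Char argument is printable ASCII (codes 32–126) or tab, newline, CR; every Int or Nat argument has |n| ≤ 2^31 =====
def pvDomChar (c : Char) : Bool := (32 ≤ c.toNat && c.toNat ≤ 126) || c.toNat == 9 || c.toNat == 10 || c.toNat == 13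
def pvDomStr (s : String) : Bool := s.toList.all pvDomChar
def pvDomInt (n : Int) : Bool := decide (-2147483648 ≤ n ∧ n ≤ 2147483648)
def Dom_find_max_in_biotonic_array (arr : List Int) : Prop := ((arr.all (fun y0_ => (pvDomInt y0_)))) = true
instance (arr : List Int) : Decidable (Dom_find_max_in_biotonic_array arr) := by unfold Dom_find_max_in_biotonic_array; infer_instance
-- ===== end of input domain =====

-- B replaces A's index-bound binary-search loop with divide-and-conquer recursion on list slices (alternative decomposition, same cost in comparisons).


-- ===== PORT A =====
-- A's while loop, step for step; start/end are Nat (0 ≤ start ≤ end = len-1 throughout the loop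
-- under Pre_, so Nat subtraction/division coincide with Python's int arithmetic here), and
-- arr[i] is List.getD (= PySem.List.pyGetD at a natCast index, exact since the loop keeps
-- indices in range on nonempty input; the empty input, where Python raises, is outside Pre_).
def pvLoopA (arr : List Int) (start e : Nat) : Int :=
  if start < e then
    let mid := start + (e - start) / 2
    if arr.getD mid 0 > arr.getD (mid + 1) 0 then
      pvLoopA arr start mid
    else
      pvLoopA arr (mid + 1) e
  else
    arr.getD start 0
termination_by e - start
decreasing_by all_goals omega

def find_max_in_biotonic_array (arr : List Int) : Int :=
  pvLoopA arr 0 (arr.length - 1)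

-- ===== PORT B =====
-- Source B's rec: recursion on the sublist itself; sub[:mid+1] / sub[mid+1:] are List.take / List.drop
-- (exact, the bounds are nonnegative: PySem.List.slice_to_natCast / slice_from_natCast).
def pvRecB (sub : List Int) : Int :=
  if sub.length ≤ 1 then
    sub.getD 0 0
  else
    let mid := (sub.length - 1) / 2
    if sub.getD mid 0 > sub.getD (mid + 1) 0 then
      pvRecB (sub.take (mid + 1))
    else
      pvRecB (sub.drop (mid + 1))
termination_by sub.length
decreasing_by all_goals simp_all [List.length_take, List.length_drop]; omega

def find_max_in_biotonic_array_alt (arr : List Int) : Int :=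
  pvRecB arr

-- ===== PRECONDITION & SPEC =====
-- Pre_ excludes only the empty list, on which Python A raises IndexError (arr[0]).
def Pre_find_max_in_biotonic_array (arr : List Int) : Prop := arr ≠ []
instance (arr : List Int) : Decidable (Pre_find_max_in_biotonic_array arr) := by unfold Pre_find_max_in_biotonic_array; infer_instance
def pvWitness_find_max_in_biotonic_array : List Int := [1, 3, 2]

def Spec_find_max_in_biotonic_array (arr : List Int) (out : Int) : Prop := out = find_max_in_biotonic_array_alt arr
instance (arr : List Int) (out : Int) : Decidable (Spec_find_max_in_biotonic_array arr out) := by unfold Spec_find_max_in_biotonic_array; infer_instance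

-- ===== CLAIM (what is proved, stated in full; the proofs are below) =====
def Claim_equal_find_max_in_biotonic_array : Prop := ∀ (arr : List Int), Dom_find_max_in_biotonic_array arr → Pre_find_max_in_biotonic_array arr → Spec_find_max_in_biotonic_array arr (find_max_in_biotonic_array arr)

-- ===== LEMMAS AND PROOFS =====

-- Indexing into the window (arr.drop s).take n recovers indexing into arr.
lemma pv_getD_window (arr : List Int) (s n i : Nat) (hi : i < n) (_hlen : s + i < arr.length) :
    ((arr.drop s).take n).getD i 0 = arr.getD (s + i) 0 := by
  have h1 : ((arr.drop s).take n)[i]? = (arr.drop s)[i]? := by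
    rw [List.getElem?_take]
    simp [hi]
  have h2 : (arr.drop s)[i]? = arr[s + i]? := by
    rw [List.getElem?_drop]
  simp [List.getD, h1, h2]

-- The loop on bounds (s, e) computes recB on the window arr[s..e] (d is fuel ≥ e - s).
lemma pv_loop_eq_rec (arr : List Int) (d : Nat) :
    ∀ s e : Nat, s ≤ e → e < arr.length → e - s ≤ d →
      pvLoopA arr s e = pvRecB ((arr.drop s).take (e - s + 1)) := by
  induction d with
  | zero =>
    intro s e hse he hd
    have hnl : ¬ s < e := by omega
    have h0 : e - s + 1 = 1 := by omega
    rw [pvLoopA, pvRecB, h0]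
    have hle : ((arr.drop s).take 1).length ≤ 1 := by
      simp [List.length_take]
    simp only [hnl, if_false, hle, if_true]
    have := pv_getD_window arr s 1 0 (by omega) (by omega)
    simpa using this
  | succ d ih =>
    intro s e hse he hd
    rw [pvLoopA, pvRecB]
    have hwlen : ((arr.drop s).take (e - s + 1)).length = e - s + 1 := by
      simp [List.length_take, List.length_drop]; omega
    by_cases h : s < e
    · have hne : ¬ ((arr.drop s).take (e - s + 1)).length ≤ 1 := by omega
      simp only [h, if_true, hne, if_false]
      rw [hwlen]
      have hmid : (e - s + 1 - 1) / 2 = (e - s) / 2 := by omega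
      rw [hmid]
      have hmlt : (e - s) / 2 < e - s := by omega
      have hg1 : ((arr.drop s).take (e - s + 1)).getD ((e - s) / 2) 0
          = arr.getD (s + (e - s) / 2) 0 :=
        pv_getD_window arr s _ _ (by omega) (by omega)
      have hg2 : ((arr.drop s).take (e - s + 1)).getD ((e - s) / 2 + 1) 0
          = arr.getD (s + ((e - s) / 2 + 1)) 0 :=
        pv_getD_window arr s (e - s + 1) ((e - s) / 2 + 1) (by omega) (by omega)
      have hg2' : arr.getD (s + ((e - s) / 2 + 1)) 0 = arr.getD (s + (e - s) / 2 + 1) 0 := by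
        ring_nf
      rw [hg1, hg2, hg2']
      by_cases hc : arr.getD (s + (e - s) / 2) 0 > arr.getD (s + (e - s) / 2 + 1) 0
      · simp only [hc, if_true]
        -- left half: a second take shrinks the window
        have hw : ((arr.drop s).take (e - s + 1)).take ((e - s) / 2 + 1)
            = (arr.drop s).take ((s + (e - s) / 2) - s + 1) := by
          rw [List.take_take]
          congr 1
          omega
        rw [hw]
        exact ih s (s + (e - s) / 2) (by omega) (by omega) (by omega)
      · simp only [hc, if_false]
        -- right half: dropping inside the window shifts its start
        have hw : ((arr.drop s).take (e - s + 1)).drop ((e - s) / 2 + 1)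
            = (arr.drop (s + (e - s) / 2 + 1)).take (e - (s + (e - s) / 2 + 1) + 1) := by
          rw [List.drop_take, List.drop_drop]
          congr 1
          omega
        rw [hw]
        exact ih (s + (e - s) / 2 + 1) e (by omega) he (by omega)
    · have h0 : e - s + 1 = 1 := by omega
      rw [h0]
      have hle : ((arr.drop s).take 1).length ≤ 1 := by
        simp [List.length_take]
      simp only [h, if_false, hle, if_true]
      have := pv_getD_window arr s 1 0 (by omega) (by omega)
      simpa using this

-- ===== VERDICT (by name: the statement is the Claim_ definition above) =====
theorem find_max_in_biotonic_array_spec : Claim_equal_find_max_in_biotonic_array := by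
  intro arr _ hpre
  unfold Spec_find_max_in_biotonic_array find_max_in_biotonic_array find_max_in_biotonic_array_alt
  have hlen : 0 < arr.length := List.length_pos_iff.mpr hpre
  have hmain := pv_loop_eq_rec arr (arr.length - 1) 0 (arr.length - 1) (by omega) (by omega) (by omega)
  have hw : (arr.drop 0).take (arr.length - 1 - 0 + 1) = arr := by
    rw [List.drop_zero]
    apply List.take_of_length_le
    omega
  rw [hmain, hw]
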